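-- pv_equiv track=rewrite | github.com/huzzzz/C-Like-Lang-Compiler | 150050003-15D170013/util.py | get_loi_str
-- ===== SOURCE A (Python) =====
-- def get_loi_str(s):
-- 	loi = 0
-- 	for c in s:
-- 		if c == '*':
-- 			loi += 1
-- 		elif c == '&':
-- 			loi -= 1
-- 		else:
-- 			break
-- 	return loi
-- ===== SOURCE B (Python) =====
-- from itertools import takewhile
--
-- def get_loi_str(s):
--     prefix = ''.join(takewhile(lambda c: c in '*&', s))
--     return prefix.count('*') - prefix.count('&')
-- ===== Notes on version B (the rewrite author's own statement) =====
-- stated objective: idiomatic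
-- what changed: Replaces the branch-per-char accumulator loop with takewhile to extract the leading '*'/'&' prefix, then returns prefix.count('*') minus prefix.count('&').
import Mathlib
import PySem

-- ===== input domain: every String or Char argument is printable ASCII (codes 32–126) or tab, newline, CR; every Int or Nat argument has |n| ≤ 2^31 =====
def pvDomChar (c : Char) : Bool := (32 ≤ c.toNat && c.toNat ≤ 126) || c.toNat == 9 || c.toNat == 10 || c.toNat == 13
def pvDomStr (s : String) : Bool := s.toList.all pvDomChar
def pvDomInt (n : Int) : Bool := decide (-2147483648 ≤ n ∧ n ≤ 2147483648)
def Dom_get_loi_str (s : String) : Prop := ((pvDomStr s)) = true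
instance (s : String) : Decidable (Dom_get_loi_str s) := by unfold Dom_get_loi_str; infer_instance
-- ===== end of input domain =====

-- B replaces A's branch-per-char accumulator loop with 'extract the leading '*'/'&' prefix, then count('*') - count('&')' (objective: idiomatic; same cost).

-- ===== PORT A =====
-- the for-loop with break, as structural recursion over the characters with accumulator loi
def pvLoopA : List Char → Int → Int
  | [], loi => loi
  | c :: cs, loi =>
      if c = '*' then pvLoopA cs (loi + 1)
      else if c = '&' then pvLoopA cs (loi - 1)
      else loi

def get_loi_str (s : String) : Int := pvLoopA s.toList 0

-- ===== PORT B =====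
-- prefix = ''.join(takewhile(lambda c: c in '*&', s)); return prefix.count('*') - prefix.count('&')
def get_loi_str_alt (s : String) : Int :=
  let pfx := s.toList.takeWhile (fun c => c == '*' || c == '&')
  (pfx.count '*' : Int) - (pfx.count '&' : Int)

-- ===== PRECONDITION & SPEC =====
def Spec_get_loi_str (s : String) (out : Int) : Prop := out = get_loi_str_alt s
instance (s : String) (out : Int) : Decidable (Spec_get_loi_str s out) := by unfold Spec_get_loi_str; infer_instance

-- ===== CLAIM (what is proved, stated in full; the proofs are below) =====
def Claim_equal_get_loi_str : Prop := ∀ (s : String), Dom_get_loi_str s → Spec_get_loi_str s (get_loi_str s)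

-- ===== LEMMAS AND PROOFS =====
theorem pvLoopA_eq (l : List Char) (k : Int) :
    pvLoopA l k =
      k + (((l.takeWhile (fun c => c == '*' || c == '&')).count '*' : Int)
        - ((l.takeWhile (fun c => c == '*' || c == '&')).count '&' : Int)) := by
  induction l generalizing k with
  | nil => simp [pvLoopA]
  | cons c cs ih =>
      by_cases h1 : c = '*'
      · subst h1
        simp [pvLoopA, ih]; ring
      · by_cases h2 : c = '&'
        · subst h2
          simp [pvLoopA, ih]; ring
        · simp [pvLoopA, h1, h2]

-- ===== VERDICT (by name: the statement is the Claim_ definition above) =====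
theorem get_loi_str_spec : Claim_equal_get_loi_str := by
  intro s _
  unfold Spec_get_loi_str get_loi_str get_loi_str_alt
  simp [pvLoopA_eq]
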